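-- pv_equiv track=rewrite | github.com/leetaewoo123/algorithm | 프로그래머스/unrated/181872. 특정 문자열로 끝나는 가장 긴 부분 문자열 찾기/특정 문자열로 끝나는 가장 긴 부분 문자열 찾기.py | solution
-- ===== SOURCE A (Python) =====
-- def solution(myString, pat):
--     answer = ''
--     word = ""
--     for i in range (len(myString)-1,-1,-1):
--         word = myString[i]+word
--         if pat in word:
--             if i == len(myString)-1:
--                 return myString
--             else:
--                 return myString[:i]+pat
-- ===== SOURCE B (Python) =====
-- def solution(myString, pat):
--     result = None
--     for i in range(len(myString) + 1):
--         if myString[i:i + len(pat)] == pat: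
--             result = myString[:i + len(pat)]
--     return result
-- ===== Notes on version B (the rewrite author's own statement) =====
-- stated objective: alternative
-- what changed: A scans backwards growing a suffix and testing 'pat in word' (substring containment) with early return; B makes a single forward pass over all start positions, testing a direct slice comparison and keeping the last matching prefix.
-- intended difference: On myString == '' and pat == '' A returns None while B returns '', which is intended because the empty string does end with the empty pattern and myString[:0] is its longest prefix ending with it. — e.g. on solution("", ""): A returns none, B returns some ""
import Mathlib
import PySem

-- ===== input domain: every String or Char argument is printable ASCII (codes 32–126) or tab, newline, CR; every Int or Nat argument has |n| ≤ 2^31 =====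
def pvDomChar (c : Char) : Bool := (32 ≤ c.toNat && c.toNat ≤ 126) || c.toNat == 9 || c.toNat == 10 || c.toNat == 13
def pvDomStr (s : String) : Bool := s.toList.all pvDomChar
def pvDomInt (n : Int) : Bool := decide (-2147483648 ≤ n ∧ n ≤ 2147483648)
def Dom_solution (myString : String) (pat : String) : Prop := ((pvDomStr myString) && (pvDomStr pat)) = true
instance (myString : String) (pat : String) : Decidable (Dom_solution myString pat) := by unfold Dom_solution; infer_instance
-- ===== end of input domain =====

-- B replaces A's backwards growing-suffix membership scan by a single left-to-right
-- last-match scan (alternative decomposition, same cost); on ("","") A returns None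
-- where B returns "" (stated as D_ below).


-- ===== PORT A =====
-- A's loop `for i in range(len(myString)-1,-1,-1)` with early returns, as a downward
-- recursion on i; `word` accumulates `myString[i]+word`; `myString[i]` is ported as
-- `s.getD i ' '` which is exact because i is always in range (0 ≤ i < len).
def solGo (s p : List Char) : Nat → List Char → Option (List Char)
  | i, word =>
    let word' := s.getD i ' ' :: word          -- word = myString[i] + word
    if PySem.Chars.isIn p word' then           -- if pat in word
      if i = s.length - 1 then some s          --   return myString
      else some (s.take i ++ p)                --   return myString[:i] + pat
    else
      match i with
      | 0 => none                              -- loop ends, implicit `return None`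
      | i' + 1 => solGo s p i' word'

def solution (myString : String) (pat : String) : Option String :=
  let s := myString.toList
  (if s.length = 0 then none                  -- empty range: loop body never runs
   else solGo s pat.toList (s.length - 1) []).map String.ofList

-- ===== PORT B =====
-- Source B: result = None; for i in range(len(myString)+1): if myString[i:i+len(pat)] == pat:
--   result = myString[:i+len(pat)]; return result
def solution_alt (myString : String) (pat : String) : Option String :=
  let s := myString.toList
  let p := pat.toList
  ((List.range (s.length + 1)).foldl
      (fun (result : Option (List Char)) (i : Nat) =>
        if PySem.List.slice s (some (i : Int)) (some ((i : Int) + p.length)) = p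
        then some (PySem.List.slice s none (some ((i : Int) + p.length)))
        else result)
      none).map String.ofList

-- ===== PRECONDITION & SPEC =====
-- On myString = "" and pat = "" A returns None, B returns "": the empty string does end
-- with the empty pattern, so "" (the longest such prefix) is the intended value.
def D_solution (myString : String) (pat : String) : Prop := myString = "" ∧ pat = ""
instance (myString : String) (pat : String) : Decidable (D_solution myString pat) := by
  unfold D_solution; infer_instance

def Spec_solution (myString : String) (pat : String) (out : Option String) : Prop :=
  ¬ D_solution myString pat → out = solution_alt myString pat
instance (myString : String) (pat : String) (out : Option String) : Decidable (Spec_solution myString pat out) := by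
  unfold Spec_solution; infer_instance

def pvDiffWitness_solution : String × String := ("", "")
def pvDiffWitnessOut_solution : (Option String) × (Option String) := (none, some "")

-- ===== CLAIM (what is proved, stated in full; the proofs are below) =====
def Claim_unchanged_solution : Prop := ∀ (myString : String) (pat : String), Dom_solution myString pat → Spec_solution myString pat (solution myString pat)
def Claim_changed_solution : Prop := Dom_solution (pvDiffWitness_solution.1) (pvDiffWitness_solution.2) ∧ D_solution (pvDiffWitness_solution.1) (pvDiffWitness_solution.2) ∧ solution (pvDiffWitness_solution.1) (pvDiffWitness_solution.2) = pvDiffWitnessOut_solution.1 ∧ solution_alt (pvDiffWitness_solution.1) (pvDiffWitness_solution.2) = pvDiffWitnessOut_solution.2 ∧ pvDiffWitnessOut_solution.1 ≠ pvDiffWitnessOut_solution.2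
def Claim_exact_solution : Prop := ∀ (myString : String) (pat : String), Dom_solution myString pat → D_solution myString pat → solution myString pat ≠ solution_alt myString pat

-- ===== LEMMAS AND PROOFS =====

-- B's fold, named for the proofs.
def fB (s p : List Char) (m : Nat) : Option (List Char) :=
  (List.range m).foldl
      (fun (result : Option (List Char)) (i : Nat) =>
        if PySem.List.slice s (some (i : Int)) (some ((i : Int) + p.length)) = p
        then some (PySem.List.slice s none (some ((i : Int) + p.length)))
        else result)
      none

theorem alt_eq (myString pat : String) :
    solution_alt myString pat = (fB myString.toList pat.toList (myString.toList.length + 1)).map String.ofList := rfl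

-- B's match test at i is exactly "p is a prefix of s.drop i".
theorem slice_cond_iff (s p : List Char) (i : Nat) :
    PySem.List.slice s (some (i : Int)) (some ((i : Int) + p.length)) = p ↔ p <+: s.drop i := by
  have hcast : ((i : Int) + p.length) = ((i + p.length : Nat) : Int) := by push_cast; ring
  rw [hcast, PySem.List.slice_natCast]
  have h2 : i + p.length - i = p.length := by omega
  rw [h2]
  constructor
  · intro h; exact h ▸ List.take_prefix _ _
  · rintro ⟨t, ht⟩; rw [← ht, List.take_left' rfl]

theorem fB_succ (s p : List Char) (m : Nat) :
    fB s p (m + 1) =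
      if PySem.List.slice s (some (m : Int)) (some ((m : Int) + p.length)) = p
      then some (PySem.List.slice s none (some ((m : Int) + p.length)))
      else fB s p m := by
  unfold fB
  rw [List.range_succ, List.foldl_append]
  rfl

theorem fB_none (s p : List Char) (m : Nat) (h : ∀ k < m, ¬ p <+: s.drop k) :
    fB s p m = none := by
  induction m with
  | zero => rfl
  | succ m ih =>
    rw [fB_succ, if_neg, ih (fun k hk => h k (by omega))]
    intro hc
    exact h m (by omega) ((slice_cond_iff s p m).mp hc)

theorem fB_some (s p : List Char) (m j : Nat) (hj : j < m) (hmatch : p <+: s.drop j)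
    (hmax : ∀ k, j < k → k < m → ¬ p <+: s.drop k) :
    fB s p m = some (s.take (j + p.length)) := by
  induction m with
  | zero => omega
  | succ m ih =>
    rcases Nat.lt_succ_iff_lt_or_eq.mp hj with hlt | rfl
    · have hnc : ¬ PySem.List.slice s (some (m : Int)) (some ((m : Int) + p.length)) = p := by
        intro hc
        exact hmax m hlt (by omega) ((slice_cond_iff s p m).mp hc)
      rw [fB_succ, if_neg hnc]
      exact ih hlt (fun k hk1 hk2 => hmax k hk1 (by omega))
    · rw [fB_succ, if_pos ((slice_cond_iff s p j).mpr hmatch)]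
      rw [PySem.List.slice_to s (by positivity)]
      have hton : ((j : Int) + (p.length : Int)).toNat = j + p.length := by omega
      rw [hton]

-- "pat in myString[i:]" means pat matches (as a prefix) at some position ≥ i.
theorem infix_drop_iff (s p : List Char) (i : Nat) :
    p <:+: s.drop i ↔ ∃ k, i ≤ k ∧ p <+: s.drop k := by
  constructor
  · rintro ⟨t, u, h⟩
    refine ⟨i + t.length, by omega, ?_⟩
    have hd : s.drop (i + t.length) = (s.drop i).drop t.length := by
      rw [List.drop_drop]
    rw [hd, ← h, List.append_assoc, List.drop_left]
    exact ⟨u, rfl⟩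
  · rintro ⟨k, hik, hpk⟩
    have h1 : s.drop k <:+ s.drop i := by
      have hd : s.drop k = (s.drop i).drop (k - i) := by rw [List.drop_drop]; congr 1; omega
      rw [hd]; exact List.drop_suffix _ _
    exact hpk.isInfix.trans h1.isInfix

-- The value A returns when `pat in word` first succeeds (at index i) equals B's fold.
theorem goA_found (s p : List Char) (hp : p ≠ []) (i : Nat) (hi : i < s.length)
    (hup : ∀ k, i < k → ¬ p <+: s.drop k) (hin : p <:+: s.drop i) :
    (if i = s.length - 1 then some s else some (s.take i ++ p)) =
      fB s p (s.length + 1) := by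
  obtain ⟨k, hik, hpk⟩ := (infix_drop_iff s p i).mp hin
  have hki : k = i := by
    by_contra hne
    exact hup k (by omega) hpk
  subst hki
  have htk : (s.drop k).take p.length = p := by
    obtain ⟨t, ht⟩ := hpk
    rw [← ht, List.take_left' rfl]
  rw [fB_some s p (s.length + 1) k (by omega) hpk
        (fun k' hk1 _ => hup k' hk1)]
  have htake : s.take (k + p.length) = s.take k ++ p := by
    rw [List.take_add, htk]
  by_cases hlast : k = s.length - 1
  · rw [if_pos hlast]
    have hlen : p.length = 1 := by
      have h1 : p.length ≤ (s.drop k).length := hpk.length_le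
      have h2 : 1 ≤ p.length := by
        cases p with
        | nil => exact absurd rfl hp
        | cons a l => simp
      rw [List.length_drop] at h1
      omega
    have : k + p.length = s.length := by omega
    rw [this, List.take_length]
  · rw [if_neg hlast, htake]

-- Main invariant for A's backwards scan: if no match strictly above i, A's loop from i
-- computes exactly B's full fold.
theorem goA (s p : List Char) (hp : p ≠ []) (i : Nat) (hi : i < s.length) :
    (∀ k, i < k → ¬ p <+: s.drop k) →
    solGo s p i (s.drop (i + 1)) = fB s p (s.length + 1) := by
  induction i with
  | zero =>
    intro hup
    have hw : s.getD 0 ' ' :: s.drop 1 = s.drop 0 := by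
      rw [List.getD_eq_getElem s ' ' hi, List.getElem_cons_drop]
    rw [solGo, hw]
    cases hin : PySem.Chars.isIn p (s.drop 0) with
    | true =>
      simp only [if_pos]
      exact goA_found s p hp 0 hi hup ((PySem.Chars.isIn_iff_infix p _).mp hin)
    | false =>
      simp only [Bool.false_eq_true]
      have hni := (PySem.Chars.isIn_eq_false_iff p _).mp hin
      refine (fB_none s p _ ?_).symm
      intro k _ hpk
      exact hni ((infix_drop_iff s p 0).mpr ⟨k, Nat.zero_le k, hpk⟩)
  | succ i ihm =>
    intro hup
    have hw : s.getD (i + 1) ' ' :: s.drop (i + 1 + 1) = s.drop (i + 1) := by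
      rw [List.getD_eq_getElem s ' ' hi, List.getElem_cons_drop]
    rw [solGo, hw]
    cases hin : PySem.Chars.isIn p (s.drop (i + 1)) with
    | true =>
      simp only [if_pos]
      exact goA_found s p hp (i + 1) hi hup ((PySem.Chars.isIn_iff_infix p _).mp hin)
    | false =>
      simp only [Bool.false_eq_true]
      have hni := (PySem.Chars.isIn_eq_false_iff p _).mp hin
      exact ihm (by omega) (fun k hk hpk =>
        hni ((infix_drop_iff s p (i + 1)).mpr ⟨k, by omega, hpk⟩))

theorem main_eq (myString pat : String) (h : ¬ D_solution myString pat) :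
    solution myString pat = solution_alt myString pat := by
  rw [alt_eq]
  simp only [solution]
  by_cases h0 : myString.toList.length = 0
  · rw [if_pos h0]
    have hnil : myString.toList = [] := List.length_eq_zero_iff.mp h0
    have hms : myString = "" := by
      have := congrArg String.ofList hnil
      simpa using this
    have hp : pat.toList ≠ [] := by
      intro hpe
      refine h ⟨hms, ?_⟩
      have := congrArg String.ofList hpe
      simpa using this
    rw [fB_none myString.toList pat.toList _ (fun k _ hpk => by
      rw [hnil] at hpk
      exact hp (List.prefix_nil.mp (by simpa using hpk)))]
  · rw [if_neg h0]
    by_cases hpe : pat.toList = []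
    · rw [solGo.eq_def, hpe]
      simp only [PySem.Chars.isIn_nil, if_pos]
      rw [fB_some myString.toList [] (myString.toList.length + 1) myString.toList.length
            (by omega) (by simp) (fun k hk1 hk2 => (by omega : False).elim)]
      simp
      rw [← String.length_toList, List.take_length, String.ofList_toList]
    · have hup : ∀ k, myString.toList.length - 1 < k → ¬ pat.toList <+: myString.toList.drop k := by
        intro k hk hpk
        have hdk : myString.toList.drop k = [] := List.drop_eq_nil_of_le (by omega)
        rw [hdk] at hpk
        exact hpe (List.prefix_nil.mp hpk)
      have hgo := goA myString.toList pat.toList hpe (myString.toList.length - 1) (by omega) hup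
      rw [show myString.toList.length - 1 + 1 = myString.toList.length from by omega,
          List.drop_length] at hgo
      rw [hgo]

-- ===== VERDICT (by name: the statement is the Claim_ definition above) =====
theorem solution_spec : Claim_unchanged_solution := by
  intro myString pat _ hD
  exact main_eq myString pat hD

theorem solution_changed : Claim_changed_solution := by
  unfold Claim_changed_solution; decide

theorem solution_tight : Claim_exact_solution := by
  intro myString pat _ hD
  obtain ⟨h1, h2⟩ := hD
  subst h1; subst h2
  decide
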